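-- pv_equiv track=rewrite | github.com/RoyKedem/d-p2p-fsn | utility.py | find_appropriate_bucket
-- ===== SOURCE A (Python) =====
-- def distance(a, b):
--     return int(a) ^ int(b)
--
-- def find_appropriate_bucket(my_id, target_id):
--     dist = distance(my_id, target_id)
--     if dist == 0:
--         return 1
--
--     for i in range(0, 128):  # replace 128 with const
--         bottom_range = (2 ** i)
--         end_range = (2 ** (i + 1))
--
--         if (bottom_range <= dist) and (dist < end_range):
--             return i
-- ===== SOURCE B (Python) =====
-- def find_appropriate_bucket(my_id, target_id):
--     dist = int(my_id) ^ int(target_id)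
--     if dist == 0:
--         return 1
--     return dist.bit_length() - 1
-- ===== Notes on version B (the rewrite author's own statement) =====
-- stated objective: simpler
-- what changed: Replaces the 128-iteration linear scan over power-of-two intervals with a single closed-form bit_length computation (floor log2 of the XOR distance).
-- outside the precondition, e.g. on find_appropriate_bucket(-1, 0): A returns None, B returns 0
import Mathlib
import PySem

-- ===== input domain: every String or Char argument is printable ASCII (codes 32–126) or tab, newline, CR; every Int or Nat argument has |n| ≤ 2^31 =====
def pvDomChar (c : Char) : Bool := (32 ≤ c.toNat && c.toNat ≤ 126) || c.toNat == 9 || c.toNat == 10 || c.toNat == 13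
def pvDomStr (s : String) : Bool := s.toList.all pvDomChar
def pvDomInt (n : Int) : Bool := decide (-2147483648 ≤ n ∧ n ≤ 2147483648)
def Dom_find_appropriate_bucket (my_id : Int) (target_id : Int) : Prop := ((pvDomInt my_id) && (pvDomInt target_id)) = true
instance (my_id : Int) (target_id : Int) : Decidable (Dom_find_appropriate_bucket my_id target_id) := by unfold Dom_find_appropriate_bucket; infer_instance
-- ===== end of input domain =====

-- B replaces A's 128-iteration scan over power-of-two intervals by a single bit_length
-- (floor log2) computation — objective: simpler.

-- ===== PORT A =====
-- the 'for i in range(0, 128)' loop with early return; 0 is the fall-through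
-- (Python returns None there), unreachable inside Pre_.
def bucketLoopA (dist : Int) (i : Nat) : Int :=
  if _h : i < 128 then
    if (2:Int) ^ i ≤ dist ∧ dist < 2 ^ (i + 1) then (i : Int)
    else bucketLoopA dist (i + 1)
  else 0
termination_by 128 - i

def find_appropriate_bucket (my_id : Int) (target_id : Int) : Int :=
  let dist := PySem.Int.bxor my_id target_id
  if dist = 0 then 1 else bucketLoopA dist 0

-- ===== PORT B =====
-- dist.bit_length() - 1 ported as Nat.log2 dist.natAbs (exact: Python bit_length is on |dist|).
def find_appropriate_bucket_alt (my_id : Int) (target_id : Int) : Int :=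
  let dist := PySem.Int.bxor my_id target_id
  if dist = 0 then 1 else (Nat.log2 dist.natAbs : Int)

-- ===== PRECONDITION & SPEC =====
-- Pre_ excludes opposite-sign id pairs: there the XOR distance is negative, A's loop
-- falls through and returns None (not an int).
def Pre_find_appropriate_bucket (my_id : Int) (target_id : Int) : Prop :=
  0 ≤ PySem.Int.bxor my_id target_id
instance (my_id : Int) (target_id : Int) : Decidable (Pre_find_appropriate_bucket my_id target_id) := by unfold Pre_find_appropriate_bucket; infer_instance

def pvWitness_find_appropriate_bucket : Int × Int := (3, 5)

def Spec_find_appropriate_bucket (my_id : Int) (target_id : Int) (out : Int) : Prop := out = find_appropriate_bucket_alt my_id target_id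
instance (my_id : Int) (target_id : Int) (out : Int) : Decidable (Spec_find_appropriate_bucket my_id target_id out) := by unfold Spec_find_appropriate_bucket; infer_instance

-- ===== CLAIM (what is proved, stated in full; the proofs are below) =====
def Claim_equal_find_appropriate_bucket : Prop := ∀ (my_id : Int) (target_id : Int), Dom_find_appropriate_bucket my_id target_id → Pre_find_appropriate_bucket my_id target_id → Spec_find_appropriate_bucket my_id target_id (find_appropriate_bucket my_id target_id)

-- ===== LEMMAS AND PROOFS =====

-- the loop returns L as soon as it reaches it, and skips every i < L because d ≥ 2^L ≥ 2^(i+1)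
lemma bucketLoopA_finds (d : Int) (L : Nat) (hL : L < 128)
    (h1 : (2:Int) ^ L ≤ d) (h2 : d < 2 ^ (L + 1)) :
    ∀ k i, L - i = k → i ≤ L → bucketLoopA d i = (L : Int) := by
  intro k
  induction k with
  | zero =>
    intro i hk hi
    have : i = L := by omega
    subst this
    rw [bucketLoopA]
    simp [hL, h1, h2]
  | succ k ih =>
    intro i hk hi
    have hiL : i < L := by omega
    rw [bucketLoopA]
    have hmono : (2:Int) ^ (i + 1) ≤ 2 ^ L := by
      exact pow_le_pow_right₀ (by norm_num) (by omega)
    have hfail : ¬((2:Int) ^ i ≤ d ∧ d < 2 ^ (i + 1)) := by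
      rintro ⟨-, hlt⟩; exact absurd (lt_of_lt_of_le hlt (hmono.trans h1)) (lt_irrefl _)
    rw [dif_pos (by omega : i < 128), if_neg hfail]
    exact ih (i + 1) (by omega) (by omega)

-- under Dom and Pre_, the XOR distance fits in 32 bits
lemma bxor_bound (a b : Int) (ha : -2147483648 ≤ a ∧ a ≤ 2147483648)
    (hb : -2147483648 ≤ b ∧ b ≤ 2147483648)
    (hpre : 0 ≤ PySem.Int.bxor a b) :
    (PySem.Int.bxor a b).natAbs < 2 ^ 32 := by
  unfold PySem.Int.bxor at *
  split_ifs at * with h1 h2 h2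
  · have hx : a.toNat ^^^ b.toNat < 2 ^ 32 :=
      Nat.xor_lt_two_pow (by omega) (by omega)
    omega
  · omega
  · omega
  · have hx : (-a - 1).toNat ^^^ (-b - 1).toNat < 2 ^ 32 :=
      Nat.xor_lt_two_pow (by omega) (by omega)
    omega

-- ===== VERDICT (by name: the statement is the Claim_ definition above) =====
theorem find_appropriate_bucket_spec : Claim_equal_find_appropriate_bucket := by
  intro my_id target_id hdom hpre
  unfold Spec_find_appropriate_bucket find_appropriate_bucket find_appropriate_bucket_alt
  set d := PySem.Int.bxor my_id target_id with hd
  by_cases h0 : d = 0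
  · simp [h0]
  · simp only [h0, if_false]
    have hdpos : 0 < d := lt_of_le_of_ne hpre (Ne.symm h0)
    have hdom' : (-2147483648 ≤ my_id ∧ my_id ≤ 2147483648) ∧
        (-2147483648 ≤ target_id ∧ target_id ≤ 2147483648) := by
      unfold Dom_find_appropriate_bucket pvDomInt at hdom
      constructor <;> [skip; skip] <;>
        simp_all [Bool.and_eq_true, decide_eq_true_eq]
    have hbound : d.natAbs < 2 ^ 32 := bxor_bound _ _ hdom'.1 hdom'.2 hpre
    set n := d.natAbs with hn
    have hn0 : n ≠ 0 := by omega
    have hcast : d = (n : Int) := by omega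
    set L := Nat.log2 n with hLdef
    have hL32 : L < 32 := (Nat.log2_lt hn0).mpr hbound
    have h1 : 2 ^ L ≤ n := Nat.log2_self_le hn0
    have h2 : n < 2 ^ (L + 1) := Nat.lt_log2_self
    have h1' : (2:Int) ^ L ≤ d := by
      rw [hcast]; exact_mod_cast h1
    have h2' : d < (2:Int) ^ (L + 1) := by
      rw [hcast]; exact_mod_cast h2
    exact bucketLoopA_finds d L (by omega) h1' h2' L 0 (by omega) (by omega)
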